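-- pv_equiv track=rewrite | github.com/ujwaldantuluri/FactState | micro-services/ecom_det_fin/app/services/risk_rules.py | _host_tokens
-- ===== SOURCE A (Python) =====
-- def _host_tokens(host: str) -> set[str]:
--     parts = host.split(".")
--     if len(parts) >= 2:
--         parts = parts[:-1]
--     tokens: set[str] = set()
--     for p in parts:
--         for t in p.replace("-", " ").split():
--             if t:
--                 tokens.add(t.lower())
--     return tokens
-- ===== SOURCE B (Python) =====
-- def _host_tokens(host: str) -> set[str]:
--     # One pass over the characters: tokens of each dot-segment are buffered and
--     # committed when the segment's closing '.' is seen; the final segment (the TLD)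
--     # is committed only if no '.' occurred at all.
--     tokens: set[str] = set()
--     seg: list[str] = []   # lowercased tokens of the current dot-segment
--     cur: list[str] = []   # characters of the token being built
--     saw_dot = False
--     for ch in host:
--         if ch == ".":
--             if cur:
--                 seg.append("".join(cur).lower())
--                 cur = []
--             tokens.update(seg)
--             seg = []
--             saw_dot = True
--         elif ch == "-" or ch.isspace():
--             if cur:
--                 seg.append("".join(cur).lower())
--                 cur = []
--         else:
--             cur.append(ch)
--     if not saw_dot:
--         if cur:
--             seg.append("".join(cur).lower())
--         tokens.update(seg)
--     return tokens
-- ===== Notes on version B (the rewrite author's own statement) =====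
-- stated objective: alternative
-- what changed: Replaces the split-on-dot-then-drop-last plus per-part replace/split tokenization with a single character scan that builds tokens directly, committing each dot-segment's tokens when the segment closes and discarding the trailing TLD segment unless no dot was seen.
import Mathlib
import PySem

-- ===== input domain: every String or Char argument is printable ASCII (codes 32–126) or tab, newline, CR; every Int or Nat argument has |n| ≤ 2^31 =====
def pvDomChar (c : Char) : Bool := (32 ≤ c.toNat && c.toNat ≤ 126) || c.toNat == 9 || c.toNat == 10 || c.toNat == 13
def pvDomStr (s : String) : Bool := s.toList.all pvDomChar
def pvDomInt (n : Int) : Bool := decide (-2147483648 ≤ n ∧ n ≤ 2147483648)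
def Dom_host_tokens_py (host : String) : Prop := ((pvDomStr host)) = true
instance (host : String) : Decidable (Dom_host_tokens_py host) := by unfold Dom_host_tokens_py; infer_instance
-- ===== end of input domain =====

-- B replaces the split/replace/split pipeline by one character scan over the host; objective: alternative (same cost, different algorithm).

-- ===== PORT A =====
def host_tokens_py (host : String) : List String :=
  -- parts = host.split(".")  (sep "." is nonempty, so Chars.splitOn is exact)
  let parts := (PySem.Chars.splitOn host.toList ['.']).map String.ofList
  -- if len(parts) >= 2: parts = parts[:-1]
  let parts := if parts.length ≥ 2 then PySem.List.slice parts none (some (-1)) else parts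
  -- tokens = set(); for p in parts: for t in p.replace("-"," ").split(): if t: tokens.add(t.lower())
  parts.foldl (fun tokens p =>
    (PySem.Str.split₀ (PySem.Str.replace p "-" " ")).foldl
      (fun tokens t => if t ≠ "" then PySem.Set.add tokens (PySem.Str.lower t) else tokens)
      tokens) PySem.Set.empty

-- ===== PORT B =====
-- the scan loop of Source B: state (cur = chars of the token being built, seg = lowercased
-- tokens of the current dot-segment, tokens, saw_dot)
def hostTokensAltGo : List Char → List Char → List String → PySem.Set String → Bool → PySem.Set String
  | [], cur, seg, tokens, sawDot =>
      if sawDot then tokens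
      else PySem.Set.update tokens
        (if cur.isEmpty then seg else seg ++ [PySem.Str.lower (String.ofList cur)])
  | c :: rest, cur, seg, tokens, sawDot =>
      if c = '.' then
        hostTokensAltGo rest [] []
          (PySem.Set.update tokens
            (if cur.isEmpty then seg else seg ++ [PySem.Str.lower (String.ofList cur)])) true
      else if c = '-' ∨ PySem.Chars.isspace c then
        hostTokensAltGo rest []
          (if cur.isEmpty then seg else seg ++ [PySem.Str.lower (String.ofList cur)]) tokens sawDot
      else hostTokensAltGo rest (cur ++ [c]) seg tokens sawDot

def host_tokens_py_alt (host : String) : List String :=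
  hostTokensAltGo host.toList [] [] PySem.Set.empty false

-- ===== PRECONDITION & SPEC =====
def Spec_host_tokens_py (host : String) (out : List String) : Prop := out = host_tokens_py_alt host
instance (host : String) (out : List String) : Decidable (Spec_host_tokens_py host out) := by unfold Spec_host_tokens_py; infer_instance

-- ===== CLAIM (what is proved, stated in full; the proofs are below) =====
def Claim_equal_host_tokens_py : Prop := ∀ (host : String), Dom_host_tokens_py host → Spec_host_tokens_py host (host_tokens_py host)

-- ===== LEMMAS AND PROOFS =====

-- the combined delimiter set: '.', '-', and whitespace
def pvDelim (c : Char) : Bool := c = '.' || c = '-' || PySem.Chars.isspace c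

def pvSwap (c : Char) : Char := if c = '-' then ' ' else c

-- maximal runs of non-delimiter characters, `cur` = partial run carried in order
def pvRuns (d : Char → Bool) : List Char → List Char → List (List Char)
  | [], cur => if cur.isEmpty then [] else [cur]
  | c :: rest, cur =>
      if d c then (if cur.isEmpty then pvRuns d rest [] else cur :: pvRuns d rest [])
      else pvRuns d rest (cur ++ [c])

def pvMkLow (r : List Char) : String := PySem.Str.lower (String.ofList r)

def pvT (p : List Char) (cur : List Char) : List String := (pvRuns pvDelim p cur).map pvMkLow

-- split on '.', `cur` = partial first part carried in order
def pvSplitDot : List Char → List Char → List (List Char)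
  | [], cur => [cur]
  | c :: rest, cur => if c = '.' then cur :: pvSplitDot rest [] else pvSplitDot rest (cur ++ [c])

-- the value hostTokensAltGo computes, expressed over the dot-parts of the remaining input
def pvBSpec : List (List Char) → List Char → List String → PySem.Set String → Bool → PySem.Set String
  | [], _, _, tok, _ => tok
  | [p], cur, seg, tok, saw => if saw then tok else PySem.Set.update tok (seg ++ pvT p cur)
  | p :: q :: qs, cur, seg, tok, _ =>
      PySem.Set.update tok (seg ++ pvT p cur ++ ((q :: qs).dropLast).flatMap (fun r => pvT r []))

theorem pvSplitOn_go_dot (l : List Char) :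
    ∀ (fuel : Nat) (cur : List Char) (acc : List (List Char)), l.length ≤ fuel →
      PySem.Chars.splitOn.go ['.'] fuel l cur acc = acc.reverse ++ pvSplitDot l cur.reverse := by
  induction l with
  | nil =>
    intro fuel cur acc _
    cases fuel <;> simp [PySem.Chars.splitOn.go, pvSplitDot]
  | cons c rest ih =>
    intro fuel cur acc hf
    cases fuel with
    | zero => simp at hf
    | succ f =>
      simp only [PySem.Chars.splitOn.go]
      simp only [List.length_cons] at hf
      by_cases hc : c = '.'
      · subst hc
        have hp : List.isPrefixOf ['.'] ('.' :: rest) = true := by simp [List.isPrefixOf]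
        rw [if_pos hp]
        simp only [List.length_cons, List.length_nil, List.drop_succ_cons, List.drop_zero]
        rw [ih f [] (cur.reverse :: acc) (by omega)]
        simp [pvSplitDot]
      · have hp : List.isPrefixOf ['.'] (c :: rest) = false := by
          simp [List.isPrefixOf]; exact fun h => hc h.symm
        rw [if_neg (by simp [hp])]
        rw [ih f (c :: cur) acc (by omega)]
        simp [pvSplitDot, hc]

theorem pvSplitOn_dot (cs : List Char) : PySem.Chars.splitOn cs ['.'] = pvSplitDot cs [] := by
  simpa using pvSplitOn_go_dot cs (cs.length + 1) [] [] (by omega)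

theorem pvReplace_go_dash (l : List Char) :
    ∀ (fuel : Nat) (acc : List Char), l.length ≤ fuel →
      PySem.Chars.replace.go ['-'] [' '] fuel l acc = acc.reverse ++ l.map pvSwap := by
  induction l with
  | nil => intro fuel acc _; cases fuel <;> simp [PySem.Chars.replace.go]
  | cons c rest ih =>
    intro fuel acc hf
    cases fuel with
    | zero => simp at hf
    | succ f =>
      simp only [PySem.Chars.replace.go]
      simp only [List.length_cons] at hf
      by_cases hc : c = '-'
      · subst hc
        have hp : List.isPrefixOf ['-'] ('-' :: rest) = true := by simp [List.isPrefixOf]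
        rw [if_pos hp]
        simp only [List.length_cons, List.length_nil, List.drop_succ_cons, List.drop_zero]
        rw [ih f _ (by omega)]
        simp [pvSwap]
      · have hp : List.isPrefixOf ['-'] (c :: rest) = false := by
          simp [List.isPrefixOf]; exact fun h => hc h.symm
        rw [if_neg (by simp [hp])]
        rw [ih f _ (by omega)]
        simp [pvSwap, hc]

theorem pvReplace_dash (p : List Char) :
    PySem.Chars.replace p ['-'] [' '] = p.map pvSwap := by
  simp only [PySem.Chars.replace]
  rw [if_neg (by simp)]
  simpa using pvReplace_go_dash p p.length [] (le_refl _)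

theorem pvSplit₀_go_eq (l : List Char) :
    ∀ (cur : List Char) (acc : List (List Char)),
      PySem.Chars.split₀.go l cur acc = acc.reverse ++ pvRuns PySem.Chars.isspace l cur.reverse := by
  induction l with
  | nil =>
    intro cur acc
    simp only [PySem.Chars.split₀.go, pvRuns]
    by_cases hq : cur = [] <;> simp [hq]
  | cons c rest ih =>
    intro cur acc
    simp only [PySem.Chars.split₀.go, pvRuns]
    by_cases hsp : PySem.Chars.isspace c = true <;> by_cases hq : cur = [] <;>
      simp [hsp, hq, ih]

theorem pvSplit₀_eq (cs : List Char) :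
    PySem.Chars.split₀ cs = pvRuns PySem.Chars.isspace cs [] := by
  simpa using pvSplit₀_go_eq cs [] []

theorem pvRuns_ne_nil (d : Char → Bool) (l cur : List Char) :
    ∀ t ∈ pvRuns d l cur, t ≠ [] := by
  induction l generalizing cur with
  | nil =>
    intro t ht
    simp only [pvRuns] at ht
    split at ht <;> simp_all
  | cons c rest ih =>
    intro t ht
    simp only [pvRuns] at ht
    split at ht
    · split at ht
      · exact ih _ _ ht
      · rcases List.mem_cons.mp ht with rfl | h
        · simp_all
        · exact ih _ _ h
    · exact ih _ _ ht

theorem pvRuns_swap (p cur : List Char) (h : '.' ∉ p) :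
    pvRuns PySem.Chars.isspace (p.map pvSwap) cur = pvRuns pvDelim p cur := by
  induction p generalizing cur with
  | nil => rfl
  | cons c rest ih =>
    have hdot : c ≠ '.' := fun hc => h (hc ▸ List.mem_cons_self ..)
    have hrest : '.' ∉ rest := fun hr => h (List.mem_cons_of_mem _ hr)
    simp only [List.map_cons, pvRuns]
    by_cases hdash : c = '-'
    · subst hdash
      have h1 : PySem.Chars.isspace (pvSwap '-') = true := by decide
      have h2 : pvDelim '-' = true := by decide
      rw [h1, h2]
      by_cases hc : cur.isEmpty <;> simp [hc, ih _ hrest]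
    · have hswap : pvSwap c = c := by simp [pvSwap, hdash]
      have hd : pvDelim c = PySem.Chars.isspace c := by simp [pvDelim, hdot, hdash]
      rw [hswap, hd]
      by_cases hsp : PySem.Chars.isspace c <;> by_cases hc : cur.isEmpty <;>
        simp [hsp, hc, ih _ hrest]

theorem pvSplitDot_ne_nil (cs cur : List Char) : pvSplitDot cs cur ≠ [] := by
  induction cs generalizing cur with
  | nil => simp [pvSplitDot]
  | cons c rest ih => simp only [pvSplitDot]; split <;> simp [ih]

theorem pvSplitDot_dotfree (cs cur : List Char) (hc : '.' ∉ cur) :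
    ∀ p ∈ pvSplitDot cs cur, '.' ∉ p := by
  induction cs generalizing cur with
  | nil => simpa [pvSplitDot] using hc
  | cons c rest ih =>
    simp only [pvSplitDot]
    split
    · intro p hp
      rcases List.mem_cons.mp hp with rfl | h
      · exact hc
      · exact ih [] (by simp) p h
    · rename_i hne
      intro p hp
      exact ih (cur ++ [c]) (by simp [hc]; exact fun h => hne h.symm) p hp

theorem pvSplitDot_shift (cs cur : List Char) :
    ∃ p qs, pvSplitDot cs [] = p :: qs ∧ pvSplitDot cs cur = (cur ++ p) :: qs := by
  induction cs generalizing cur with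
  | nil => exact ⟨[], [], rfl, by simp [pvSplitDot]⟩
  | cons c rest ih =>
    simp only [pvSplitDot]
    split
    · exact ⟨[], pvSplitDot rest [], rfl, by simp⟩
    · obtain ⟨p, qs, h1, h2⟩ := ih [c]
      obtain ⟨p', qs', h1', h2'⟩ := ih (cur ++ [c])
      rw [h1] at h1'
      injection h1' with e1 e2
      subst e1; subst e2
      refine ⟨c :: p, qs, by simpa using h2, ?_⟩
      rw [h2']; simp

theorem pvSlice_neg1 {α : Type} (xs : List α) (h : xs ≠ []) :
    PySem.List.slice xs none (some (-1)) = xs.dropLast := by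
  have hlen : 1 ≤ xs.length := List.length_pos_iff.mpr h
  simp only [PySem.List.slice, PySem.List.clampIdx]
  norm_num
  rw [List.dropLast_eq_take]
  congr 1
  rw [if_neg h]
  omega

theorem pvT_nil (cur : List Char) (segl : List String) :
    (if cur.isEmpty then segl else segl ++ [PySem.Str.lower (String.ofList cur)])
      = segl ++ pvT [] cur := by
  by_cases hq : cur = [] <;> simp [hq, pvT, pvRuns, pvMkLow]

theorem pvT_cons_delim (c : Char) (h : pvDelim c = true) (q cur : List Char) :
    pvT (c :: q) cur = pvT [] cur ++ pvT q [] := by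
  by_cases hq : cur = [] <;> simp [hq, pvT, pvRuns, h]

theorem pvT_cons_nondelim (c : Char) (h : pvDelim c = false) (q cur : List Char) :
    pvT (c :: q) cur = pvT q (cur ++ [c]) := by
  simp [pvT, pvRuns, h]

theorem pvAltGo_bSpec (cs : List Char) :
    ∀ cur seg tok saw,
      hostTokensAltGo cs cur seg tok saw = pvBSpec (pvSplitDot cs []) cur seg tok saw := by
  induction cs with
  | nil =>
    intro cur seg tok saw
    simp only [hostTokensAltGo, pvSplitDot, pvBSpec]
    rw [pvT_nil cur seg]
  | cons c rest ih =>
    intro cur seg tok saw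
    obtain ⟨q, qs, hP⟩ : ∃ q qs, pvSplitDot rest [] = q :: qs := by
      cases h : pvSplitDot rest [] with
      | nil => exact absurd h (pvSplitDot_ne_nil rest [])
      | cons a b => exact ⟨a, b, rfl⟩
    by_cases hdot : c = '.'
    · subst hdot
      have h2 : pvSplitDot ('.' :: rest) [] = [] :: q :: qs := by
        simp [pvSplitDot, hP]
      simp only [hostTokensAltGo, if_true]
      rw [pvT_nil cur seg, ih, hP, h2]
      cases qs with
      | nil =>
        simp only [pvBSpec]
        simp [PySem.Set.update_append]
      | cons q2 qs2 =>
        simp only [pvBSpec]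
        rw [← PySem.Set.update_append]
        simp [List.dropLast_cons_of_ne_nil]
    · have hshift := pvSplitDot_shift rest [c]
      obtain ⟨q', qs', h1', h2'⟩ := hshift
      rw [hP] at h1'
      injection h1' with e1 e2
      subst e1; subst e2
      have h2 : pvSplitDot (c :: rest) [] = (c :: q) :: qs := by
        simpa [pvSplitDot, hdot] using h2'
      by_cases hdel : c = '-' ∨ PySem.Chars.isspace c
      · have hd : pvDelim c = true := by
          rcases hdel with h | h
          · simp [pvDelim, h]
          · simp [pvDelim, h]
        simp only [hostTokensAltGo, if_neg hdot, if_pos hdel]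
        rw [pvT_nil cur seg, ih, hP, h2]
        cases qs with
        | nil =>
          simp only [pvBSpec]
          rw [pvT_cons_delim c hd]
          by_cases hs : saw <;> simp [hs]
        | cons q2 qs2 =>
          simp only [pvBSpec]
          rw [pvT_cons_delim c hd]
          congr 1
          simp
      · have hd : pvDelim c = false := by
          simp only [pvDelim]
          obtain ⟨h1, h3⟩ := not_or.mp hdel
          simp [hdot, h1, h3]
        simp only [hostTokensAltGo, if_neg hdot, if_neg hdel]
        rw [ih, hP, h2]
        cases qs with
        | nil => simp only [pvBSpec]; rw [pvT_cons_nondelim c hd]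
        | cons q2 qs2 => simp only [pvBSpec]; rw [pvT_cons_nondelim c hd]

theorem pvOfList_ne_empty (r : List Char) (h : r ≠ []) : String.ofList r ≠ "" := by
  intro he
  have := congrArg String.toList he
  simp [String.toList_ofList] at this
  exact h this

theorem pvInner_foldl (rs : List (List Char)) (h : ∀ r ∈ rs, r ≠ []) (tok : PySem.Set String) :
    (rs.map String.ofList).foldl
        (fun tok t => if t ≠ "" then PySem.Set.add tok (PySem.Str.lower t) else tok) tok
      = PySem.Set.update tok (rs.map pvMkLow) := by
  induction rs generalizing tok with
  | nil => rfl
  | cons r rs' ih =>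
    have hr : String.ofList r ≠ "" := pvOfList_ne_empty r (h r (List.mem_cons_self ..))
    simp only [List.map_cons, List.foldl_cons, if_pos hr]
    rw [ih (fun r hr' => h r (List.mem_cons_of_mem _ hr'))]
    rfl

theorem pvInner_eq (p : List Char) (hp : '.' ∉ p) (tok : PySem.Set String) :
    (PySem.Str.split₀ (PySem.Str.replace (String.ofList p) "-" " ")).foldl
        (fun tok t => if t ≠ "" then PySem.Set.add tok (PySem.Str.lower t) else tok) tok
      = PySem.Set.update tok (pvT p []) := by
  have hrep : PySem.Str.replace (String.ofList p) "-" " " = String.ofList (p.map pvSwap) := by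
    simp only [PySem.Str.replace, String.toList_ofList]
    rw [show "-".toList = ['-'] from rfl, show " ".toList = [' '] from rfl, pvReplace_dash]
  rw [hrep]
  simp only [PySem.Str.split₀, String.toList_ofList]
  rw [pvSplit₀_eq, pvRuns_swap p [] hp]
  exact pvInner_foldl _ (pvRuns_ne_nil pvDelim p []) tok

theorem pvOuter_foldl (ps : List (List Char)) (h : ∀ p ∈ ps, '.' ∉ p) (tok : PySem.Set String) :
    (ps.map String.ofList).foldl
        (fun tok p =>
          (PySem.Str.split₀ (PySem.Str.replace p "-" " ")).foldl
            (fun tok t => if t ≠ "" then PySem.Set.add tok (PySem.Str.lower t) else tok) tok) tok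
      = PySem.Set.update tok (ps.flatMap (fun q => pvT q [])) := by
  induction ps generalizing tok with
  | nil => rfl
  | cons pp ps' ih =>
    simp only [List.map_cons, List.foldl_cons, List.flatMap_cons]
    rw [pvInner_eq pp (h pp (List.mem_cons_self ..)) tok,
        ih (fun p hp => h p (List.mem_cons_of_mem _ hp)),
        PySem.Set.update_append]

theorem pvA_canonical (host : String) :
    host_tokens_py host =
      PySem.Set.ofList
        ((if (pvSplitDot host.toList []).length ≥ 2
            then (pvSplitDot host.toList []).dropLast
            else pvSplitDot host.toList []).flatMap (fun q => pvT q [])) := by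
  have hdf : ∀ p ∈ pvSplitDot host.toList [], '.' ∉ p :=
    pvSplitDot_dotfree host.toList [] (by simp)
  have hdf' : ∀ p ∈ (pvSplitDot host.toList []).dropLast, '.' ∉ p :=
    fun p hp => hdf p ((List.dropLast_sublist _).mem hp)
  simp only [host_tokens_py, pvSplitOn_dot]
  by_cases hlen : ((pvSplitDot host.toList []).map String.ofList).length ≥ 2
  · rw [if_pos hlen,
      pvSlice_neg1 _ (by
        intro he
        exact pvSplitDot_ne_nil host.toList [] (List.map_eq_nil_iff.mp he)),
      ← List.map_dropLast,
      pvOuter_foldl _ hdf' PySem.Set.empty]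
    rw [if_pos (by simpa using hlen)]
    rw [PySem.Set.ofList_eq_foldl]
    rfl
  · rw [if_neg hlen, pvOuter_foldl _ hdf PySem.Set.empty]
    rw [if_neg (by simpa using hlen)]
    rw [PySem.Set.ofList_eq_foldl]
    rfl

-- ===== VERDICT (by name: the statement is the Claim_ definition above) =====
theorem host_tokens_py_spec : Claim_equal_host_tokens_py := by
  intro host _
  unfold Spec_host_tokens_py host_tokens_py_alt
  rw [pvA_canonical, pvAltGo_bSpec]
  obtain ⟨q, qs, hP⟩ : ∃ q qs, pvSplitDot host.toList [] = q :: qs := by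
    cases h : pvSplitDot host.toList [] with
    | nil => exact absurd h (pvSplitDot_ne_nil host.toList [])
    | cons a b => exact ⟨a, b, rfl⟩
  rw [hP]
  cases qs with
  | nil =>
    rw [if_neg (by simp)]
    simp only [pvBSpec, List.flatMap_cons, List.flatMap_nil, List.append_nil, Bool.false_eq_true,
      if_false]
    rw [PySem.Set.ofList_eq_foldl]
    rfl
  | cons q2 qs2 =>
    rw [if_pos (by simp)]
    simp only [pvBSpec]
    rw [List.dropLast_cons_of_ne_nil (by simp), List.flatMap_cons]
    rw [PySem.Set.ofList_eq_foldl]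
    simp [PySem.Set.update, List.foldl_append]
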